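-- pv_equiv track=rewrite | github.com/posl/comment_recommendation | script/split_gen/5_time/en/132_B/8.py | check_if_two_chars_appear_twice_in_str
-- ===== SOURCE A (Python) =====
-- def check_if_two_chars_appear_twice_in_str(str):
--     if len(str) != 4:
--         return False
--     if len(set(str)) != 2:
--         return False
--     for char in set(str):
--         if str.count(char) != 2:
--             return False
--     return True
-- ===== SOURCE B (Python) =====
-- def check_if_two_chars_appear_twice_in_str(str):
--     t = sorted(str)
--     return len(t) == 4 and t[0] == t[1] and t[2] == t[3] and t[1] != t[2]
-- ===== Notes on version B (the rewrite author's own statement) =====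
-- stated objective: alternative
-- what changed: B sorts the characters and decides everything by the shape of the sorted list (two adjacent equal pairs with a strict break between them), replacing A's set construction and per-character count loop with sort-then-pattern-match.
import Mathlib
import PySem

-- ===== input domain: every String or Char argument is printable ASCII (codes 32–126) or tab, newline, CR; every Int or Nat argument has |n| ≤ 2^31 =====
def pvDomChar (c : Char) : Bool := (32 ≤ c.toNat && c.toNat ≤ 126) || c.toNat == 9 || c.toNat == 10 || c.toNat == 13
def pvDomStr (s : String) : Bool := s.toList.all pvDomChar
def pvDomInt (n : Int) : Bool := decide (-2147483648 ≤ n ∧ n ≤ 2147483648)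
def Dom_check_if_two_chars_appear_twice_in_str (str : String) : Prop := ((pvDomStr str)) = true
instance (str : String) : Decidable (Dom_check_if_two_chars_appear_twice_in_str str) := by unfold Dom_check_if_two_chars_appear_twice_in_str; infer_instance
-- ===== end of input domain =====

-- B sorts the characters and decides by the SHAPE of the sorted list (two adjacent equal pairs
-- separated by a strict break), replacing A's set + per-character-count loop (alternative algorithm).

-- ===== PORT A =====
-- str.count(char) for a single character equals the count of that character among the string's
-- characters (exact: a 1-char needle has no overlapping occurrences).
def check_if_two_chars_appear_twice_in_str (str : String) : Bool :=
  if PySem.Str.len str ≠ 4 then false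
  else if PySem.Set.len (PySem.Set.ofList str.toList) ≠ 2 then false
  else (PySem.Set.ofList str.toList).all (fun ch => (str.toList.count ch : Int) == 2)

-- ===== PORT B =====
-- t = sorted(str); return len(t) == 4 and t[0] == t[1] and t[2] == t[3] and t[1] != t[2]
-- (the length guard plus the three guarded indexings are the 4-element pattern match)
def check_if_two_chars_appear_twice_in_str_alt (str : String) : Bool :=
  match PySem.List.sorted str.toList (fun x => x) false with
  | [a, b, c, d] => a == b && c == d && b != c
  | _ => false

-- ===== PRECONDITION & SPEC =====
def Spec_check_if_two_chars_appear_twice_in_str (str : String) (out : Bool) : Prop := out = check_if_two_chars_appear_twice_in_str_alt str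
instance (str : String) (out : Bool) : Decidable (Spec_check_if_two_chars_appear_twice_in_str str out) := by unfold Spec_check_if_two_chars_appear_twice_in_str; infer_instance

-- ===== CLAIM (what is proved, stated in full; the proofs are below) =====
def Claim_equal_check_if_two_chars_appear_twice_in_str : Prop := ∀ (str : String), Dom_check_if_two_chars_appear_twice_in_str str → Spec_check_if_two_chars_appear_twice_in_str str (check_if_two_chars_appear_twice_in_str str)

-- ===== LEMMAS AND PROOFS =====

-- shared characterisation: both programs decide "l is a permutation of [x,x,y,y] for some x ≠ y"

-- counts 2/2 over a length-4 list whose elements are all x or y give the permutation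
theorem pv_perm_of_counts {l : List Char} {x y : Char} (hxy : x ≠ y)
    (hmem : ∀ z ∈ l, z = x ∨ z = y) (hcx : l.count x = 2) (hcy : l.count y = 2) :
    l.Perm [x, x, y, y] := by
  rw [List.perm_iff_count]
  intro z
  by_cases hzx : z = x
  · subst hzx; simp [hcx, Ne.symm hxy]
  · by_cases hzy : z = y
    · subst hzy; simp [hcy, hxy]
    · have : l.count z = 0 := by
        rw [List.count_eq_zero]
        intro hz
        rcases hmem z hz with rfl | rfl <;> simp_all
      simp [this, Ne.symm hzx, Ne.symm hzy]

-- if l ~ [x,x,y,y] with x ≠ y then sorted(l) is [m,m,M,M] with m < M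
theorem pv_sorted_shape {l : List Char} {x y : Char} (hxy : x ≠ y)
    (hp : l.Perm [x, x, y, y]) :
    ∃ m M : Char, m < M ∧ PySem.List.sorted l (fun z => z) false = [m, m, M, M] := by
  have hswap : ([x, x, y, y] : List Char).Perm [y, y, x, x] := by
    have := List.perm_append_comm (l₁ := [x, x]) (l₂ := [y, y])
    simpa using this
  rcases lt_or_gt_of_ne hxy with h | h
  · refine ⟨x, y, h, ?_⟩
    exact PySem.List.sorted_id_eq_of_perm_of_pairwise l [x, x, y, y] hp.symm
      (by simp [List.pairwise_cons, le_of_lt h])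
  · refine ⟨y, x, h, ?_⟩
    exact PySem.List.sorted_id_eq_of_perm_of_pairwise l [y, y, x, x] (hp.trans hswap).symm
      (by simp [List.pairwise_cons, le_of_lt h])

theorem pv_main (str : String) :
    check_if_two_chars_appear_twice_in_str str = check_if_two_chars_appear_twice_in_str_alt str := by
  rw [Bool.eq_iff_iff]
  unfold check_if_two_chars_appear_twice_in_str check_if_two_chars_appear_twice_in_str_alt
  set l := str.toList with hl
  set s := PySem.Set.ofList l with hs
  have hnd : s.Nodup := PySem.Set.nodup_ofList l
  have hmem : ∀ x, x ∈ s ↔ x ∈ l := fun x => PySem.Set.mem_ofList l x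
  constructor
  · -- A = true → B = true
    intro hA
    split_ifs at hA with h1 h2
    have hs2 : s.length = 2 := by simp [PySem.Set.len] at h2; omega
    obtain ⟨x, y, hxy'⟩ : ∃ x y, s = [x, y] := by
      match s, hs2 with | [x, y], _ => exact ⟨x, y, rfl⟩
    have hxy : x ≠ y := by
      have := hnd; rw [hxy'] at this; simp at this; exact this
    rw [hxy'] at hA
    simp only [List.all_cons, List.all_nil, Bool.and_true, Bool.and_eq_true, beq_iff_eq] at hA
    have hcx : l.count x = 2 := by exact_mod_cast hA.1
    have hcy : l.count y = 2 := by exact_mod_cast hA.2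
    have hmem' : ∀ z ∈ l, z = x ∨ z = y := by
      intro z hz
      have := (hmem z).mpr hz
      rw [hxy'] at this; simpa using this
    obtain ⟨m, M, hmM, hsorted⟩ :=
      pv_sorted_shape hxy (pv_perm_of_counts hxy hmem' hcx hcy)
    rw [hsorted]
    simp [ne_of_lt hmM]
  · -- B = true → A = true
    intro hB
    rcases hsl : PySem.List.sorted l (fun x => x) false with _ | ⟨a, _ | ⟨b, _ | ⟨c, _ | ⟨d, _ | ⟨e, t⟩⟩⟩⟩⟩ <;>
      rw [hsl] at hB <;> simp at hB
    case cons.cons.cons.cons.nil =>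
      obtain ⟨⟨hab, hcd⟩, hbc⟩ := hB
      subst hab; subst hcd
      have hac : a ≠ c := hbc
      have hperm : l.Perm [a, a, c, c] := by
        have := PySem.List.sorted_perm l (fun x => x) false
        rw [hsl] at this
        exact this.symm
      have hlen : l.length = 4 := by simpa using hperm.length_eq
      have hca : l.count a = 2 := by
        rw [hperm.count_eq]; simp [Ne.symm hac]
      have hcc : l.count c = 2 := by
        rw [hperm.count_eq]; simp [hac]
      have hmem' : ∀ z, z ∈ l ↔ (z = a ∨ z = c) := by
        intro z
        rw [hperm.mem_iff]
        simp only [List.mem_cons, List.not_mem_nil, or_false]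
        tauto
      have hfin : s.toFinset = {a, c} := by
        ext z
        simp [List.mem_toFinset, hmem z, hmem' z, Finset.mem_insert]
      have hs2 : s.length = 2 := by
        have h1 := List.toFinset_card_of_nodup hnd
        rw [hfin] at h1
        rw [← h1, Finset.card_pair hac]
      rw [if_neg (by simp [PySem.Str.len_eq, ← hl, hlen]),
          if_neg (by simp [PySem.Set.len, hs2])]
      rw [List.all_eq_true]
      intro ch hch
      rcases (hmem' ch).mp ((hmem ch).mp hch) with rfl | rfl
      · simp [hca]
      · simp [hcc]

-- ===== VERDICT (by name: the statement is the Claim_ definition above) =====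
theorem check_if_two_chars_appear_twice_in_str_spec : Claim_equal_check_if_two_chars_appear_twice_in_str := by
  intro str _
  exact pv_main str
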